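-- pv_equiv track=rewrite | github.com/acbilson/chaos-micropub | src/app/log/log_factory.py | _parseBody
-- ===== SOURCE A (Python) =====
-- def _parseBody(body: list) -> tuple:
--     """returns a (list, list)
--
--     parses a list into its top matter (toml) and content (md)
--     """
--     is_top_matter = False
--     top_matter = []
--     content = []
--
--     for line in body:
--         if line == "+++\n":
--             is_top_matter = not is_top_matter
--             continue
--
--         if is_top_matter and line != "+++\n":
--             top_matter.append(line)
--         else:
--             content.append(line)
--
--     return top_matter, content
-- ===== SOURCE B (Python) =====
-- def _parseBody(body: list) -> tuple:
--     """returns a (list, list)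
--
--     parses a list into its top matter (toml) and content (md)
--
--     Two-phase: group lines into segments split on each '+++\n' fence,
--     then partition segments by index parity (odd -> top matter, even -> content).
--     """
--     segments = []
--     current = []
--     for line in body:
--         if line == "+++\n":
--             segments.append(current)
--             current = []
--         else:
--             current.append(line)
--     segments.append(current)
--
--     top_matter = [l for i, seg in enumerate(segments) if i % 2 == 1 for l in seg]
--     content = [l for i, seg in enumerate(segments) if i % 2 == 0 for l in seg]
--     return top_matter, content
-- ===== Notes on version B (the rewrite author's own statement) =====
-- stated objective: alternative
-- what changed: Replaces the single pass with a toggling boolean flag by a two-phase group-then-partition: one pass splits the body into segments at each '+++\n' fence, then top matter is gathered from the odd-indexed segments and content from the even-indexed ones.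
import Mathlib
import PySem

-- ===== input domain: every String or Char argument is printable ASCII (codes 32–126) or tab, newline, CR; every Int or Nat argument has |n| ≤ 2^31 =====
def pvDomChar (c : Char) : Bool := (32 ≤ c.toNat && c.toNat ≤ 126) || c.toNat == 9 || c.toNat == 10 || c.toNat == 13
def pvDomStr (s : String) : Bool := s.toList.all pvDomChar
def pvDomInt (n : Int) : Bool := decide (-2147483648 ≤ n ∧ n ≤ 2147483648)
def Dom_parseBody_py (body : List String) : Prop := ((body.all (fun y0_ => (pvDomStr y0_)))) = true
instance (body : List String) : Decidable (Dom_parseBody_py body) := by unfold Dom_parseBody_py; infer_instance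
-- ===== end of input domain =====

-- B replaces A's single pass with a toggling boolean flag by a two-phase
-- group-then-partition (split into fence-delimited segments, then pick segments
-- by index parity); same O(n) cost, equivalence proved below (objective: alternative).

-- ===== PORT A =====
-- state: (is_top_matter, top_matter, content)
def parseBody_py (body : List String) : List String × List String :=
  let st := body.foldl
    (fun (s : Bool × List String × List String) line =>
      if line = "+++\n" then (!s.1, s.2.1, s.2.2)
      else if s.1 ∧ line ≠ "+++\n" then (s.1, s.2.1 ++ [line], s.2.2)
      else (s.1, s.2.1, s.2.2 ++ [line]))
    (false, [], [])
  (st.2.1, st.2.2)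

-- ===== PORT B =====
-- phase 1: group into segments, state (segments, current)
-- phase 2: flatten odd-indexed segments (top matter) and even-indexed ones (content)
def parseBody_py_alt (body : List String) : List String × List String :=
  let st := body.foldl
    (fun (s : List (List String) × List String) line =>
      if line = "+++\n" then (s.1 ++ [s.2], [])
      else (s.1, s.2 ++ [line]))
    ([], [])
  let segments := st.1 ++ [st.2]
  let top_matter := ((segments.zipIdx).filter (fun p => p.2 % 2 == 1)).flatMap Prod.fst
  let content := ((segments.zipIdx).filter (fun p => p.2 % 2 == 0)).flatMap Prod.fst
  (top_matter, content)

-- ===== PRECONDITION & SPEC =====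
def Spec_parseBody_py (body : List String) (out : List String × List String) : Prop := out = parseBody_py_alt body
instance (body : List String) (out : List String × List String) : Decidable (Spec_parseBody_py body out) := by unfold Spec_parseBody_py; infer_instance

-- ===== CLAIM (what is proved, stated in full; the proofs are below) =====
def Claim_equal_parseBody_py : Prop := ∀ (body : List String), Dom_parseBody_py body → Spec_parseBody_py body (parseBody_py body)

-- ===== LEMMAS AND PROOFS =====

-- reference: front recursion with the toggling flag
def pvRef : Bool → List String → List String × List String
  | _, [] => ([], [])
  | flag, l :: ls =>
    if l = "+++\n" then pvRef (!flag) ls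
    else
      let r := pvRef flag ls
      if flag then (l :: r.1, r.2) else (r.1, l :: r.2)

-- back-to-front segment splitter (spec of B's phase 1)
def pvSegs : List String → List (List String)
  | [] => [[]]
  | l :: ls =>
    if l = "+++\n" then [] :: pvSegs ls
    else (l :: (pvSegs ls).headI) :: (pvSegs ls).tail

-- parity partition of a segment list; the Bool says whether the head segment is top matter
def pvParts : Bool → List (List String) → List String × List String
  | _, [] => ([], [])
  | b, s :: ss =>
    let r := pvParts (!b) ss
    if b then (s ++ r.1, r.2) else (r.1, s ++ r.2)

theorem pvSegs_ne_nil (ls : List String) : pvSegs ls ≠ [] := by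
  cases ls with
  | nil => simp [pvSegs]
  | cons l ls => unfold pvSegs; split <;> simp

theorem parseBody_py_foldl (rest : List String) :
    ∀ (flag : Bool) (top content : List String),
      (rest.foldl
        (fun (s : Bool × List String × List String) line =>
          if line = "+++\n" then (!s.1, s.2.1, s.2.2)
          else if s.1 ∧ line ≠ "+++\n" then (s.1, s.2.1 ++ [line], s.2.2)
          else (s.1, s.2.1, s.2.2 ++ [line]))
        (flag, top, content)).2
      = (top ++ (pvRef flag rest).1, content ++ (pvRef flag rest).2) := by
  induction rest with
  | nil => intro flag top content; simp [pvRef]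
  | cons l ls ih =>
    intro flag top content
    by_cases hl : l = "+++\n"
    · simp [List.foldl_cons, hl, pvRef, ih]
    · cases flag with
      | false => simp [List.foldl_cons, hl, pvRef, ih]
      | true => simp [List.foldl_cons, hl, pvRef, ih]

theorem parseBody_py_eq_ref (body : List String) :
    parseBody_py body = pvRef false body := by
  unfold parseBody_py
  simp [parseBody_py_foldl body false [] []]

theorem parseBody_py_alt_foldl (rest : List String) :
    ∀ (segs : List (List String)) (cur : List String),
      (rest.foldl
        (fun (s : List (List String) × List String) line =>
          if line = "+++\n" then (s.1 ++ [s.2], [])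
          else (s.1, s.2 ++ [line]))
        (segs, cur)).1
      ++ [(rest.foldl
        (fun (s : List (List String) × List String) line =>
          if line = "+++\n" then (s.1 ++ [s.2], [])
          else (s.1, s.2 ++ [line]))
        (segs, cur)).2]
      = segs ++ (cur ++ (pvSegs rest).headI) :: (pvSegs rest).tail := by
  induction rest with
  | nil => intro segs cur; simp [pvSegs]
  | cons l ls ih =>
    intro segs cur
    obtain ⟨s, ss, hss⟩ : ∃ s ss, pvSegs ls = s :: ss :=
      List.exists_cons_of_ne_nil (pvSegs_ne_nil ls)
    by_cases hl : l = "+++\n"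
    · subst hl
      simp only [List.foldl_cons, if_true]
      rw [ih (segs ++ [cur]) []]
      simp [pvSegs, hss]
    · simp only [List.foldl_cons, if_neg hl]
      rw [ih segs (cur ++ [l])]
      simp [pvSegs, hl, hss]

theorem pvParts_zipIdx (segs : List (List String)) :
    ∀ n : Nat,
      ((((segs.zipIdx n).filter (fun p => p.2 % 2 == 1)).flatMap Prod.fst,
        (((segs.zipIdx n).filter (fun p => p.2 % 2 == 0)).flatMap Prod.fst))
      = pvParts (n % 2 == 1) segs) := by
  induction segs with
  | nil => intro n; simp [pvParts]
  | cons s ss ih =>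
    intro n
    have hn : n % 2 = 0 ∨ n % 2 = 1 := by omega
    have hih := ih (n + 1)
    rcases hn with hn | hn
    · have h1 : (n + 1) % 2 = 1 := by omega
      rw [h1, show ((1 : Nat) == 1) = true from rfl] at hih
      simp only [List.zipIdx_cons, List.filter_cons, hn, pvParts]
      simp [← hih]
    · have h1 : (n + 1) % 2 = 0 := by omega
      rw [h1, show ((0 : Nat) == 1) = false from rfl] at hih
      simp only [List.zipIdx_cons, List.filter_cons, hn, pvParts]
      simp [← hih]

theorem pvParts_segs (body : List String) :
    ∀ flag : Bool, pvParts flag (pvSegs body) = pvRef flag body := by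
  induction body with
  | nil => intro flag; cases flag <;> simp [pvSegs, pvParts, pvRef]
  | cons l ls ih =>
    intro flag
    by_cases hl : l = "+++\n"
    · subst hl
      simp only [pvSegs, pvRef]
      cases flag <;> simp [pvParts, ih]
    · obtain ⟨s, ss, hss⟩ : ∃ s ss, pvSegs ls = s :: ss :=
        List.exists_cons_of_ne_nil (pvSegs_ne_nil ls)
      have ihf := ih flag
      rw [hss] at ihf
      simp only [pvSegs, if_neg hl, hss, List.headI, List.tail,
        pvRef, ← ihf]
      cases flag <;> simp [pvParts]

theorem parseBody_py_alt_eq_ref (body : List String) :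
    parseBody_py_alt body = pvRef false body := by
  obtain ⟨s, ss, hss⟩ : ∃ s ss, pvSegs body = s :: ss :=
    List.exists_cons_of_ne_nil (pvSegs_ne_nil body)
  have h := parseBody_py_alt_foldl body [] []
  rw [hss] at h
  simp only [List.headI, List.tail, List.nil_append] at h
  have hz := pvParts_zipIdx (s :: ss) 0
  rw [show ((0 : Nat) % 2 == 1) = false from rfl] at hz
  have hp := pvParts_segs body false
  rw [hss] at hp
  unfold parseBody_py_alt
  simp only [h]
  exact hz.trans hp

-- ===== VERDICT (by name: the statement is the Claim_ definition above) =====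
theorem parseBody_py_spec : Claim_equal_parseBody_py := by
  intro body _
  unfold Spec_parseBody_py
  rw [parseBody_py_eq_ref, parseBody_py_alt_eq_ref]
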